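-- pv_equiv track=rewrite | github.com/Thommy96/IMS-Toucan | TrainingInterfaces/TrainingPipelines/PortaSpeech_FrenchPretraining.py | split_dictionary
-- ===== SOURCE A (Python) =====
-- def split_dictionary(input_dict, split_n):
--     res = []
--     new_dict = {}
--     elements_per_dict = (len(input_dict.keys()) // split_n) + 1
--     for k, v in input_dict.items():
--         if len(new_dict) < elements_per_dict:
--             new_dict[k] = v
--         else:
--             res.append(new_dict)
--             new_dict = {k: v}
--     res.append(new_dict)
--     return res
-- ===== SOURCE B (Python) =====
-- def split_dictionary(input_dict, split_n):
--     items = list(input_dict.items())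
--     eps = len(items) // split_n + 1
--     return [dict(items[i:i + eps]) for i in range(0, len(items), eps)]
-- ===== Notes on version B (the rewrite author's own statement) =====
-- stated objective: alternative
-- what changed: Replaces A's single stateful fold (growing a current dict, flushing it when full) by computing the chunk size once and index-striding over the materialized item list with slices, building each chunk dict directly.
-- intended difference: On an empty input dict A returns [{}] (a list containing one empty dict, the leftover accumulator) while B returns [], which is the intended 'no chunks' answer for splitting an empty dict. — e.g. on split_dictionary([], 1): A returns [[]], B returns []
-- outside the precondition, e.g. on split_dictionary({'a': 'x', 'b': 'y'}, -1): A returns [{}, {'a': 'x'}, {'b': 'y'}], B returns []; on split_dictionary({'a': 'x'}, 0): A raises ZeroDivisionError, B raises ZeroDivisionError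
import Mathlib
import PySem

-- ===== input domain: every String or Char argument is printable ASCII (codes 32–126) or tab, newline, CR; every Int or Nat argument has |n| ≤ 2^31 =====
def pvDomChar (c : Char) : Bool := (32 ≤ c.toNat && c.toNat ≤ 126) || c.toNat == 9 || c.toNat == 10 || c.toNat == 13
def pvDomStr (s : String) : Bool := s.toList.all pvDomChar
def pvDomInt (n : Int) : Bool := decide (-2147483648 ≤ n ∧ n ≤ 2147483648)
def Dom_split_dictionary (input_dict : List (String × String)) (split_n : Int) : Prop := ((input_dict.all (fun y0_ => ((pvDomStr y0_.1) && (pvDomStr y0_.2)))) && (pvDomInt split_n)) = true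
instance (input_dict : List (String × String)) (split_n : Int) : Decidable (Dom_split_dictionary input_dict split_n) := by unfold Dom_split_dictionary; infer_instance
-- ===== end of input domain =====

-- B replaces A's stateful fill-and-flush dict fold by index-strided slicing over the
-- materialized item list (alternative decomposition, same cost); on the empty dict A
-- returns [{}] and B returns [] — stated as the intended difference D_ below.


-- ===== PORT A =====
def split_dictionary (input_dict : List (String × String)) (split_n : Int) : List (List (String × String)) :=
  let elements_per_dict : Int := PySem.Int.floordiv (input_dict.length : Int) split_n + 1
  let st := input_dict.foldl
    (fun (s : List (List (String × String)) × PySem.Dict String String) kv =>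
      if ((s.2.size : Int) < elements_per_dict) then
        (s.1, s.2.insert kv.1 kv.2)
      else
        (s.1 ++ [s.2.items], (PySem.Dict.empty).insert kv.1 kv.2))
    ([], PySem.Dict.empty)
  st.1 ++ [st.2.items]

-- ===== PORT B =====
def split_dictionary_alt (input_dict : List (String × String)) (split_n : Int) : List (List (String × String)) :=
  let items := input_dict
  let eps : Int := PySem.Int.floordiv (items.length : Int) split_n + 1
  (PySem.List.pyRange 0 (items.length : Int) eps).map
    (fun i => (PySem.Dict.ofList (PySem.List.slice items (some i) (some (i + eps)))).items)

-- ===== PRECONDITION & SPEC =====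
-- Pre_ excludes split_n = 0 (A raises ZeroDivisionError), negative split_n (outside the
-- natural domain of a split count; A returns [{}] followed by singletons there), and
-- association lists with duplicate keys (a Python dict cannot contain them, so such
-- lists are an artefact of the assoc-list representation).
def Pre_split_dictionary (input_dict : List (String × String)) (split_n : Int) : Prop :=
  0 < split_n ∧ (input_dict.map Prod.fst).Nodup
instance (input_dict : List (String × String)) (split_n : Int) : Decidable (Pre_split_dictionary input_dict split_n) := by unfold Pre_split_dictionary; infer_instance
def pvWitness_split_dictionary : (List (String × String)) × Int := ([("a", "1"), ("b", "2"), ("c", "3")], 2)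

-- On the empty dict A returns [{}] (the leftover empty accumulator) while B returns [],
-- the intended 'no chunks' answer for splitting an empty dict.
def D_split_dictionary (input_dict : List (String × String)) (split_n : Int) : Prop :=
  input_dict = []
instance (input_dict : List (String × String)) (split_n : Int) : Decidable (D_split_dictionary input_dict split_n) := by unfold D_split_dictionary; infer_instance

def Spec_split_dictionary (input_dict : List (String × String)) (split_n : Int) (out : List (List (String × String))) : Prop := ¬ D_split_dictionary input_dict split_n → out = split_dictionary_alt input_dict split_n
instance (input_dict : List (String × String)) (split_n : Int) (out : List (List (String × String))) : Decidable (Spec_split_dictionary input_dict split_n out) := by unfold Spec_split_dictionary; infer_instance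

def pvDiffWitness_split_dictionary : (List (String × String)) × Int := ([], 1)
def pvDiffWitnessOut_split_dictionary : (List (List (String × String))) × (List (List (String × String))) := ([[]], [])

-- ===== CLAIM (what is proved, stated in full; the proofs are below) =====
def Claim_unchanged_split_dictionary : Prop := ∀ (input_dict : List (String × String)) (split_n : Int), Dom_split_dictionary input_dict split_n → Pre_split_dictionary input_dict split_n → Spec_split_dictionary input_dict split_n (split_dictionary input_dict split_n)
def Claim_changed_split_dictionary : Prop := Dom_split_dictionary (pvDiffWitness_split_dictionary.1) (pvDiffWitness_split_dictionary.2) ∧ Pre_split_dictionary (pvDiffWitness_split_dictionary.1) (pvDiffWitness_split_dictionary.2) ∧ D_split_dictionary (pvDiffWitness_split_dictionary.1) (pvDiffWitness_split_dictionary.2) ∧ split_dictionary (pvDiffWitness_split_dictionary.1) (pvDiffWitness_split_dictionary.2) = pvDiffWitnessOut_split_dictionary.1 ∧ split_dictionary_alt (pvDiffWitness_split_dictionary.1) (pvDiffWitness_split_dictionary.2) = pvDiffWitnessOut_split_dictionary.2 ∧ pvDiffWitnessOut_split_dictionary.1 ≠ pvDiffWitnessOut_split_dictionary.2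
def Claim_exact_split_dictionary : Prop := ∀ (input_dict : List (String × String)) (split_n : Int), Dom_split_dictionary input_dict split_n → Pre_split_dictionary input_dict split_n → D_split_dictionary input_dict split_n → split_dictionary input_dict split_n ≠ split_dictionary_alt input_dict split_n

-- ===== LEMMAS AND PROOFS =====

-- Reference chunking: greedy blocks of E elements (last block may be shorter).
def pvChunks (E : Nat) (xs : List (String × String)) : List (List (String × String)) :=
  if _h : xs.length ≤ E then [xs]
  else xs.take E :: pvChunks E (xs.drop (max E 1))
termination_by xs.length
decreasing_by simp; omega

theorem pvChunks_of_le {E : Nat} {xs : List (String × String)} (h : xs.length ≤ E) :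
    pvChunks E xs = [xs] := by rw [pvChunks]; simp [h]

theorem pvChunks_of_lt {E : Nat} {xs : List (String × String)} (h : E < xs.length) (hE : 0 < E) :
    pvChunks E xs = xs.take E :: pvChunks E (xs.drop E) := by
  have hm : max E 1 = E := by omega
  rw [pvChunks, dif_neg (Nat.not_le.mpr h), hm]

-- Reference form of A's loop.
def pvGoA (E : Nat) (res : List (List (String × String))) (cur : List (String × String)) :
    List (String × String) → List (List (String × String))
  | [] => res ++ [cur]
  | x :: xs =>
    if cur.length < E then pvGoA E res (cur ++ [x]) xs
    else pvGoA E (res ++ [cur]) [x] xs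

theorem pvGoA_shift (E : Nat) (xs : List (String × String)) :
    ∀ res cur, pvGoA E res cur xs = res ++ pvGoA E [] cur xs := by
  induction xs with
  | nil => intro res cur; simp only [pvGoA, List.nil_append]
  | cons x xs ih =>
    intro res cur
    by_cases h : cur.length < E
    · simp only [pvGoA, if_pos h]
      exact ih res (cur ++ [x])
    · simp only [pvGoA, if_neg h]
      rw [ih (res ++ [cur]), ih ([] ++ [cur])]
      simp

theorem pvGoA_eq_chunks (E : Nat) (hE : 0 < E) (xs : List (String × String)) :
    ∀ cur, cur.length ≤ E → pvGoA E [] cur xs = pvChunks E (cur ++ xs) := by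
  induction xs with
  | nil =>
    intro cur hc
    simp [pvGoA, pvChunks_of_le hc]
  | cons x xs ih =>
    intro cur hc
    by_cases h : cur.length < E
    · have := ih (cur ++ [x]) (by simp; omega)
      simp only [pvGoA, if_pos h, this, List.append_assoc, List.singleton_append]
    · have hlen : cur.length = E := by omega
      simp only [pvGoA, if_neg h]
      rw [pvGoA_shift, ih [x] (by simp; omega)]
      have hbig : E < (cur ++ x :: xs).length := by simp; omega
      rw [pvChunks_of_lt hbig hE, List.take_left' hlen, List.drop_left' hlen]
      simp

-- A's fold equals pvGoA provided all keys stay fresh.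
theorem pvFold_eq_goA (e : Int) (E : Nat) (hE : (E : Int) = e)
    (xs : List (String × String)) :
    ∀ (res : List (List (String × String))) (d : PySem.Dict String String),
      (d.keys ++ xs.map Prod.fst).Nodup →
      (let st := xs.foldl
        (fun (s : List (List (String × String)) × PySem.Dict String String) kv =>
          if ((s.2.size : Int) < e) then
            (s.1, s.2.insert kv.1 kv.2)
          else
            (s.1 ++ [s.2.items], (PySem.Dict.empty).insert kv.1 kv.2))
        (res, d)
      st.1 ++ [st.2.items]) = pvGoA E res d.items xs := by
  induction xs with
  | nil => intro res d _; simp [pvGoA]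
  | cons x xs ih =>
    intro res d hnd
    have hfresh : x.1 ∉ d.keys := by
      intro hmem
      have hdis := (List.nodup_append.mp hnd).2.2
      exact hdis x.1 hmem x.1 (by simp) rfl
    have hcont : d.contains x.1 = false := by
      by_contra hcon
      have htrue : d.contains x.1 = true := by simpa using hcon
      exact hfresh ((PySem.Dict.contains_iff_mem_keys d x.1).mp htrue)
    have hsize : d.size = d.items.length := rfl
    have hkeys : d.keys = d.items.map Prod.fst := rfl
    by_cases h : d.items.length < E
    · have hc : ((d.size : Int) < e) := by rw [hsize, ← hE]; exact_mod_cast h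
      have hitems : (d.insert x.1 x.2).items = d.items ++ [(x.1, x.2)] :=
        PySem.Dict.items_insert_of_not_contains d x.2 hcont
      have hkeys' : (d.insert x.1 x.2).keys = d.keys ++ [x.1] := by
        show (d.insert x.1 x.2).items.map Prod.fst = _
        rw [hitems]; simp [hkeys]
      have hnd' : ((d.insert x.1 x.2).keys ++ xs.map Prod.fst).Nodup := by
        rw [hkeys', List.append_assoc, List.singleton_append]
        simpa using hnd
      simp only [List.foldl_cons, if_pos hc]
      rw [ih res (d.insert x.1 x.2) hnd']
      simp only [pvGoA, if_pos h, hitems]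
    · have hc : ¬ ((d.size : Int) < e) := by rw [hsize, ← hE]; intro hcon; exact h (by exact_mod_cast hcon)
      have hone : ((PySem.Dict.empty : PySem.Dict String String).insert x.1 x.2).items = [(x.1, x.2)] := rfl
      have hnd' : (((PySem.Dict.empty : PySem.Dict String String).insert x.1 x.2).keys ++ xs.map Prod.fst).Nodup := by
        have : ((PySem.Dict.empty : PySem.Dict String String).insert x.1 x.2).keys = [x.1] := rfl
        rw [this, List.singleton_append]
        exact (List.nodup_append.mp hnd).2.1
      simp only [List.foldl_cons, if_neg hc]
      rw [ih (res ++ [d.items]) _ hnd']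
      simp only [pvGoA, if_neg (by omega : ¬ d.items.length < E), hone]

-- ofList on a duplicate-free association list returns it unchanged.
theorem pvItems_ofList (ps : List (String × String)) (hnd : (ps.map Prod.fst).Nodup) :
    (PySem.Dict.ofList ps).items = ps := by
  show ((PySem.Dict.empty : PySem.Dict String String).update ps).items = ps
  unfold PySem.Dict.update
  have := PySem.Dict.items_foldl_insert_fresh (l := ps) (k := Prod.fst) (v := Prod.snd)
    (d := (PySem.Dict.empty : PySem.Dict String String)) (by intro a _; rfl) hnd
  simpa using this

-- range(0, b, e) for 0 < e, 0 < b starts at 0 and the rest is a shifted stride.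
theorem pvRange_stride_cons {e b : Int} (he : 0 < e) (hb : 0 < b) :
    PySem.List.pyRange 0 b e = 0 :: (PySem.List.pyRange 0 (b - e) e).map (fun i => i + e) := by
  rw [PySem.List.pyRange_of_pos 0 b he, PySem.List.pyRange_of_pos 0 (b - e) he]
  have key : ((b - 0 + e - 1) / e).toNat =
      (if (0 : Int) < b - e then ((b - e - 0 + e - 1) / e).toNat else 0) + 1 := by
    by_cases hbe : (0 : Int) < b - e
    · rw [if_pos hbe]
      have h1 : b - 0 + e - 1 = (b - e - 0 + e - 1) + 1 * e := by ring
      rw [h1, Int.add_mul_ediv_right _ _ (by omega : e ≠ 0)]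
      have h2 : 0 ≤ (b - e - 0 + e - 1) / e := Int.ediv_nonneg (by omega) (by omega)
      omega
    · rw [if_neg hbe]
      have h1 : (b - 0 + e - 1) / e = 1 := by
        rw [← PySem.Int.floordiv_eq_ediv_of_pos he, PySem.Int.floordiv_eq_iff_of_pos he]
        constructor <;> omega
      omega
  rw [if_pos hb, key, List.range_succ_eq_map]
  simp only [List.map_cons, List.map_map, Nat.cast_zero, mul_zero, zero_add]
  congr 1
  apply List.map_congr_left
  intro k _
  simp only [Function.comp]
  push_cast
  ring

-- pyRange is empty when the stop does not exceed the start (positive step).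
theorem pvRange_stride_nil {e b : Int} (he : 0 < e) (hb : b ≤ 0) :
    PySem.List.pyRange 0 b e = [] := by
  rw [PySem.List.pyRange_of_pos 0 b he, if_neg (by omega)]
  simp

-- B's strided slicing computes pvChunks on nonempty lists.
theorem pvStride_eq_chunks (e : Int) (E : Nat) (hE : (E : Int) = e) (he : 0 < e) :
    ∀ (n : Nat) (xs : List (String × String)), xs.length = n → xs ≠ [] →
      (PySem.List.pyRange 0 (xs.length : Int) e).map
        (fun i => ((xs.drop i.toNat).take E)) = pvChunks E xs := by
  intro n
  induction n using Nat.strong_induction_on with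
  | _ n ih =>
    intro xs hlen hne
    have hpos : 0 < xs.length := List.length_pos_iff.mpr hne
    by_cases hsmall : xs.length ≤ E
    · have hb : (xs.length : Int) - e ≤ 0 := by omega
      rw [pvRange_stride_cons he (by exact_mod_cast hpos), pvRange_stride_nil he hb]
      rw [pvChunks_of_le hsmall]
      simp [List.take_of_length_le hsmall]
    · have hlt : E < xs.length := by omega
      have hb : (0 : Int) < (xs.length : Int) - e := by omega
      rw [pvRange_stride_cons he (by exact_mod_cast hpos)]
      rw [pvChunks_of_lt hlt (by omega)]
      simp only [List.map_cons, List.map_map, Int.toNat_zero, List.drop_zero]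
      congr 1
      have hcongr : ∀ i ∈ PySem.List.pyRange 0 ((xs.length : Int) - e) e,
          (((fun i => (xs.drop i.toNat).take E) ∘ fun i => i + e) i) =
          (((xs.drop E).drop i.toNat).take E) := by
        intro i hi
        have hi0 : 0 ≤ i := ((PySem.List.mem_pyRange_iff_of_pos he i).mp hi).1
        have : (i + e).toNat = i.toNat + E := by omega
        simp only [Function.comp, this]
        rw [List.drop_drop, Nat.add_comm]
      rw [List.map_congr_left hcongr]
      have hlen' : ((xs.drop E).length : Int) = (xs.length : Int) - e := by
        simp [List.length_drop]; omega
      rw [← hlen']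
      exact ih (xs.drop E).length (by simp [List.length_drop]; omega) (xs.drop E) rfl
        (by intro hcon; have := congrArg List.length hcon; simp [List.length_drop] at this; omega)

-- The shared chunk size: for 0 < split_n it is at least 1.
theorem pvEps_pos (n : Nat) (split_n : Int) (hs : 0 < split_n) :
    0 < PySem.Int.floordiv (n : Int) split_n + 1 := by
  rw [PySem.Int.floordiv_eq_ediv_of_pos hs]
  have := Int.ediv_nonneg (by exact_mod_cast Nat.zero_le n : (0:Int) ≤ (n : Int)) (le_of_lt hs)
  omega

-- ===== VERDICT (by name: the statement is the Claim_ definition above) =====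
theorem split_dictionary_spec : Claim_unchanged_split_dictionary := by
  intro xs split_n _ hpre hD
  obtain ⟨hs, hnd⟩ := hpre
  have hDne : xs ≠ [] := by intro h; exact hD h
  set e : Int := PySem.Int.floordiv ((xs.length : Int)) split_n + 1 with hedef
  have he : 0 < e := pvEps_pos xs.length split_n hs
  set E : Nat := e.toNat with hEdef
  have hE : (E : Int) = e := by omega
  -- A = pvChunks E xs
  have hA : split_dictionary xs split_n = pvChunks E xs := by
    unfold split_dictionary
    rw [pvFold_eq_goA e E hE xs [] PySem.Dict.empty (by simpa using hnd)]
    have : (PySem.Dict.empty : PySem.Dict String String).items = [] := rfl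
    rw [this]
    have := pvGoA_eq_chunks E (by omega) xs [] (by simp)
    simpa using this
  -- B = pvChunks E xs
  have hB : split_dictionary_alt xs split_n = pvChunks E xs := by
    unfold split_dictionary_alt
    have hcongr : ∀ i ∈ PySem.List.pyRange 0 ((xs.length : Int)) e,
        (PySem.Dict.ofList (PySem.List.slice xs (some i) (some (i + e)))).items =
        (xs.drop i.toNat).take E := by
      intro i hi
      have hi0 : 0 ≤ i := ((PySem.List.mem_pyRange_iff_of_pos he i).mp hi).1
      have hsl : PySem.List.slice xs (some i) (some (i + e)) =
          (xs.drop i.toNat).take ((i + e).toNat - i.toNat) :=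
        PySem.List.slice_toNat xs hi0 (by omega)
      have hEe : (i + e).toNat - i.toNat = E := by omega
      rw [hsl, hEe]
      apply pvItems_ofList
      have hsub : ((xs.drop i.toNat).take E).Sublist xs :=
        ((xs.drop i.toNat).take_sublist E).trans (xs.drop_sublist i.toNat)
      exact (hsub.map Prod.fst).nodup hnd
    rw [List.map_congr_left hcongr]
    exact pvStride_eq_chunks e E hE he xs.length xs rfl hDne
  rw [hA, hB]

theorem split_dictionary_changed : Claim_changed_split_dictionary := by
  unfold Claim_changed_split_dictionary; decide

theorem split_dictionary_tight : Claim_exact_split_dictionary := by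
  intro xs split_n _ hpre hD
  obtain ⟨hs, _⟩ := hpre
  subst hD
  have hA : split_dictionary [] split_n = [[]] := rfl
  have he : 0 < PySem.Int.floordiv ((0 : Int)) split_n + 1 := pvEps_pos 0 split_n hs
  have hB : split_dictionary_alt [] split_n = [] := by
    unfold split_dictionary_alt
    simp only [List.length_nil, Nat.cast_zero]
    rw [pvRange_stride_nil he (by omega)]
    rfl
  rw [hA, hB]
  simp
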